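-- pv_equiv track=rewrite | github.com/Nobatek/GenScen | extract.py | _format_passive
-- ===== SOURCE A (Python) =====
-- import itertools
--
-- def _format_passive(intvs_passive):
--     intvs = intvs_passive['value'].split('||')
--     # create dictionary of intervention
--     passive_ = {}
--     for intv in intvs:
--         action, material = intv.strip().split(':')
--         if action in passive_.keys():
--             passive_[action].append(intv.strip())
--         else:
--             passive_[action] = [intv.strip()]
--     passive__ = list(map(lambda x: list(passive_[x]), passive_.keys()))
--     # compute all combinations
--     return list(itertools.product(*passive__))
-- ===== SOURCE B (Python) =====
-- def _format_passive(intvs_passive):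
--     # parse once: (action, stripped token) pairs
--     items = []
--     for t in intvs_passive['value'].split('||'):
--         t = t.strip()
--         action, material = t.split(':')
--         items.append((action, t))
--
--     def build(its):
--         # recursive partition: the first pair's action picks the leading group,
--         # the remaining actions are handled recursively -- no dict, no itertools
--         if not its:
--             return [()]
--         act = its[0][0]
--         group = [t for a, t in its if a == act]
--         rest = [(a, t) for a, t in its if a != act]
--         return [(x,) + r for x in group for r in build(rest)]
--
--     return build(items)
-- ===== Notes on version B (the rewrite author's own statement) =====
-- stated objective: alternative
-- what changed: B drops the dict and itertools entirely: a recursion partitions the token list by the first token's action, builds that group's combinations and recurses on the remaining tokens, instead of A's staged group-into-dict then itertools.product.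
import Mathlib
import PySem

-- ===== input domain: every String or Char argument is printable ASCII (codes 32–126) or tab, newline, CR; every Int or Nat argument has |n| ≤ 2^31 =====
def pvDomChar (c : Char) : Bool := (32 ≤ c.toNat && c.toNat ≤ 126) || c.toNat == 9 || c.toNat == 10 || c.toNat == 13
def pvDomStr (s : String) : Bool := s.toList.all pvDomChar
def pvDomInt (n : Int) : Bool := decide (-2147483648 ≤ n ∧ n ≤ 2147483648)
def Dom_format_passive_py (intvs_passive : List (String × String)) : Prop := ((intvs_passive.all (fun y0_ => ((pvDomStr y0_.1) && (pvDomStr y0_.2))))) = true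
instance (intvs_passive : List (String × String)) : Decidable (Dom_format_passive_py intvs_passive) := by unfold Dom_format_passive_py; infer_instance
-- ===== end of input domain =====

-- B drops the dict and itertools: it recursively partitions the token list by the first
-- token's action and recurses on the remaining tokens (objective: alternative, same cost).

-- token.split(':')[0]; split(sep) is never empty, so [0] is the head
def pvKey (t : String) : String := ((PySem.Str.split? t ":").getD []).headD ""

-- ===== PORT A =====
-- itertools.product(*groups): leftmost group outermost, rightmost varies fastest
def pyProduct : List (List String) → List (List String)
  | [] => [[]]
  | g :: gs => g.flatMap (fun x => (pyProduct gs).map (fun rest => x :: rest))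

def format_passive_py (intvs_passive : List (String × String)) : List (List String) :=
  -- intvs_passive['value']; KeyError (excluded by Pre_) defaulted to ""
  let s := ((PySem.Dict.ofList intvs_passive).get? "value").getD ""
  -- s.split('||'); split? is none only for sep = "", so getD [] is exact here
  let intvs := (PySem.Str.split? s "||").getD []
  let passive_ := intvs.foldl (fun d intv =>
    -- action, material = intv.strip().split(':')  (ValueError unless exactly 2 parts: excluded by Pre_)
    let action := pvKey (PySem.Str.strip intv)
    if d.contains action then
      d.modify action [] (fun l => l ++ [PySem.Str.strip intv])   -- passive_[action].append(...)
    else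
      d.insert action [PySem.Str.strip intv]) PySem.Dict.empty
  let passive__ := passive_.keys.map (fun x => (passive_.get? x).getD [])
  pyProduct passive__

-- ===== PORT B =====
-- action, material = t.split(':'); on the admitted inputs the split has two parts, so
-- action is the head (outside Pre_ the unpack raises ValueError; head defaulted to "")
-- build(its): partition its by the first pair's action, recurse on the rest
def pvBuild : List (String × String) → List (List String)
  | [] => [[]]
  | p :: ps =>
    let act := p.1
    let group := ((p :: ps).filter (fun q => q.1 == act)).map (fun q => q.2)
    let rest := (p :: ps).filter (fun q => !(q.1 == act))
    group.flatMap (fun x => (pvBuild rest).map (fun r => x :: r))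
  termination_by ps => ps.length
  decreasing_by
    simp only [List.filter_cons, beq_self_eq_true, Bool.not_true, Bool.false_eq_true,
      if_false]
    exact Nat.lt_succ_of_le (List.length_filter_le _ _)

def format_passive_py_alt (intvs_passive : List (String × String)) : List (List String) :=
  let s := ((PySem.Dict.ofList intvs_passive).get? "value").getD ""
  let items := ((PySem.Str.split? s "||").getD []).map (fun t =>
    (pvKey (PySem.Str.strip t), PySem.Str.strip t))
  pvBuild items

-- ===== PRECONDITION & SPEC =====
-- Pre_ excludes exactly the inputs where Python A raises: a missing 'value' key (KeyError)
-- and tokens whose strip().split(':') does not have exactly two parts (ValueError on unpacking).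
def Pre_format_passive_py (intvs_passive : List (String × String)) : Prop :=
  ((PySem.Dict.ofList intvs_passive).get? "value").isSome = true ∧
  ∀ t ∈ (PySem.Str.split? (((PySem.Dict.ofList intvs_passive).get? "value").getD "") "||").getD [],
    ((PySem.Str.split? (PySem.Str.strip t) ":").getD []).length = 2
instance (intvs_passive : List (String × String)) : Decidable (Pre_format_passive_py intvs_passive) := by unfold Pre_format_passive_py; infer_instance

def pvWitness_format_passive_py : (List (String × String)) := [("value", "a:1 || b:2 || a:3")]

def Spec_format_passive_py (intvs_passive : List (String × String)) (out : List (List String)) : Prop := out = format_passive_py_alt intvs_passive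
instance (intvs_passive : List (String × String)) (out : List (List String)) : Decidable (Spec_format_passive_py intvs_passive out) := by unfold Spec_format_passive_py; infer_instance

-- ===== CLAIM (what is proved, stated in full; the proofs are below) =====
def Claim_equal_format_passive_py : Prop := ∀ (intvs_passive : List (String × String)), Dom_format_passive_py intvs_passive → Pre_format_passive_py intvs_passive → Spec_format_passive_py intvs_passive (format_passive_py intvs_passive)

-- ===== LEMMAS AND PROOFS =====

-- A's if/contains/append-else-insert step is exactly Dict.modify with default []
theorem step_eq_modify (d : PySem.Dict String (List String)) (a : String) (t : String) :
    (if d.contains a then d.modify a [] (fun l => l ++ [t]) else d.insert a [t])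
      = d.modify a [] (fun l => l ++ [t]) := by
  by_cases h : d.contains a = true
  · simp [h]
  · simp [h, PySem.Dict.modify, PySem.Dict.getD, PySem.Dict.get?]
    have : List.find? (fun p => p.1 == a) d.items = none := by
      rw [List.find?_eq_none]
      intro p hp
      simp only [Bool.not_eq_true]
      by_contra hb
      exact h (List.any_eq_true.mpr ⟨p, hp, by simpa using hb⟩)
    simp [this]

-- the grouping dict's lookup at k collects exactly the tokens whose key is k
theorem groups_getD (tokens : List String) (k : String) :
    (tokens.foldl (fun d t => d.modify (pvKey t) [] (fun l => l ++ [t]))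
        (PySem.Dict.empty : PySem.Dict String (List String))).getD k []
      = tokens.filter (fun t => pvKey t == k) := by
  have h := PySem.Dict.getD_foldl_modify_append
      (l := tokens.map (fun t => (pvKey t, t)))
      (d := (PySem.Dict.empty : PySem.Dict String (List String))) (c := k)
  rw [List.foldl_map] at h
  simpa [List.filter_map, Function.comp_def, List.map_map] using h

-- the grouping dict's keys are the distinct actions in first-occurrence order
theorem groups_keys (tokens : List String) :
    (tokens.foldl (fun d t => d.modify (pvKey t) [] (fun l => l ++ [t]))
        (PySem.Dict.empty : PySem.Dict String (List String))).keys
      = PySem.Set.ofList (tokens.map pvKey) := by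
  rw [PySem.Dict.keys_foldl_modify_key (key := pvKey)]
  simp [PySem.Dict.empty, PySem.Dict.keys, PySem.Set.update_nil_left]

-- Set.discard is a filter
theorem set_discard_eq (s : List String) (x : String) :
    PySem.Set.discard s x = s.filter (fun y => !(y == x)) := by
  simp [PySem.Set.discard]

-- Set.ofList commutes with filter
theorem ofList_filter (P : String → Bool) (l : List String) :
    (PySem.Set.ofList l).filter P = PySem.Set.ofList (l.filter P) := by
  induction l with
  | nil => simp [PySem.Set.ofList_nil]
  | cons x l ih =>
    by_cases hx : P x = true
    · rw [PySem.Set.ofList_cons, set_discard_eq, List.filter_cons_of_pos hx,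
        List.filter_cons_of_pos hx, PySem.Set.ofList_cons, set_discard_eq, ← ih,
        List.filter_filter, List.filter_filter]
      exact congrArg (x :: ·) (List.filter_congr (fun a _ => Bool.and_comm _ _))
    · have hx' : P x = false := by simpa using hx
      rw [PySem.Set.ofList_cons, set_discard_eq, List.filter_cons_of_neg (by simp [hx']),
        List.filter_cons_of_neg (by simp [hx']), ← ih, List.filter_filter]
      refine List.filter_congr (fun a _ => ?_)
      cases ha : P a
      · simp
      · have hax : (a == x) = false := by
          by_contra h
          have hax' : (a == x) = true := by simpa using h
          rw [eq_of_beq hax'] at ha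
          simp [hx'] at ha
        simp [hax]

-- beq is symmetric in falsehood (String has LawfulBEq)
theorem beq_false_symm {a b : String} (h : (a == b) = false) : (b == a) = false := by
  cases hb : (b == a)
  · rfl
  · exfalso; rw [eq_of_beq hb] at h; simp at h

-- B's recursion computes the product of the first-occurrence-ordered groups
theorem build_eq_product (ps : List (String × String)) :
    pyProduct ((PySem.Set.ofList (ps.map (fun q => q.1))).map
        (fun k => (ps.filter (fun q => q.1 == k)).map (fun q => q.2)))
      = pvBuild ps := by
  fun_induction pvBuild ps with
  | case1 => simp [PySem.Set.ofList_nil, pyProduct]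
  | case2 p ps' act group rest ih =>
    have hrestmap : rest.map (fun q => q.1)
        = (ps'.map (fun q => q.1)).filter (fun k => !(k == act)) := by
      show ((p :: ps').filter (fun q => !(q.1 == act))).map (fun q => q.1) = _
      rw [List.filter_cons_of_neg (by simp [act]), List.filter_map]
      rfl
    have hset : PySem.Set.ofList ((p :: ps').map (fun q => q.1))
        = act :: PySem.Set.ofList (rest.map (fun q => q.1)) := by
      rw [List.map_cons, PySem.Set.ofList_cons, set_discard_eq, ofList_filter, hrestmap]
    rw [hset, List.map_cons]
    have htail : (PySem.Set.ofList (rest.map (fun q => q.1))).map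
          (fun k => ((p :: ps').filter (fun q => q.1 == k)).map (fun q => q.2))
        = (PySem.Set.ofList (rest.map (fun q => q.1))).map
          (fun k => (rest.filter (fun q => q.1 == k)).map (fun q => q.2)) := by
      refine List.map_congr_left (fun k hk => ?_)
      have hkne : (k == act) = false := by
        have hkmem : k ∈ rest.map (fun q => q.1) :=
          (PySem.Set.mem_ofList (xs := rest.map (fun q => q.1)) (y := k)).mp hk
        obtain ⟨u, hu, rfl⟩ := List.mem_map.mp hkmem
        simpa using List.of_mem_filter hu
      have h1 : (p.1 == k) = false := beq_false_symm hkne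
      rw [List.filter_cons_of_neg (by simp [h1])]
      have : ps'.filter (fun q => q.1 == k)
          = ((p :: ps').filter (fun q => !(q.1 == act))).filter (fun q => q.1 == k) := by
        rw [List.filter_cons_of_neg (by simp [act]), List.filter_filter]
        refine List.filter_congr (fun a _ => ?_)
        cases ha : (a.1 == k)
        · simp
        · have : (a.1 == act) = false := by rw [eq_of_beq ha]; exact hkne
          simp [this]
      rw [this]
    rw [htail, pyProduct, ih]

-- the dict's key-ordered value lists are the groups of the parsed pairs
theorem vals_eq (tokens : List String) :
    (tokens.foldl (fun d t => d.modify (pvKey t) [] (fun l => l ++ [t]))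
        (PySem.Dict.empty : PySem.Dict String (List String))).keys.map
      (fun x => ((tokens.foldl (fun d t => d.modify (pvKey t) [] (fun l => l ++ [t]))
        (PySem.Dict.empty : PySem.Dict String (List String))).get? x).getD [])
    = (PySem.Set.ofList ((tokens.map (fun t => (pvKey t, t))).map (fun q => q.1))).map
        (fun k => ((tokens.map (fun t => (pvKey t, t))).filter (fun q => q.1 == k)).map
          (fun q => q.2)) := by
  have hfst : (tokens.map (fun t => (pvKey t, t))).map (fun q => q.1) = tokens.map pvKey := by
    rw [List.map_map]; rfl
  rw [hfst, groups_keys]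
  refine List.map_congr_left (fun k _ => ?_)
  rw [← PySem.Dict.getD_eq_get?_getD, groups_getD, List.filter_map, List.map_map]
  simp [Function.comp_def]

-- ===== VERDICT (by name: the statement is the Claim_ definition above) =====
set_option maxHeartbeats 1000000 in
theorem format_passive_py_spec : Claim_equal_format_passive_py := by
  intro intvs_passive _ _
  unfold Spec_format_passive_py format_passive_py format_passive_py_alt
  simp only []
  set intvs := (PySem.Str.split? (((PySem.Dict.ofList intvs_passive).get? "value").getD "") "||").getD [] with hintvs
  have hfold : intvs.foldl (fun d intv =>
      let action := pvKey (PySem.Str.strip intv)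
      if d.contains action then d.modify action [] (fun l => l ++ [PySem.Str.strip intv])
      else d.insert action [PySem.Str.strip intv]) PySem.Dict.empty
    = (intvs.map PySem.Str.strip).foldl
        (fun d t => d.modify (pvKey t) [] (fun l => l ++ [t])) PySem.Dict.empty := by
    rw [List.foldl_map]
    apply PySem.List.foldl_congr_mem
    intro d intv _
    exact step_eq_modify d _ _
  rw [hfold, vals_eq (intvs.map PySem.Str.strip), build_eq_product]
  congr 1
  rw [List.map_map]
  rfl
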